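-- pv_equiv track=rewrite | github.com/modhari/nre-platform | services/nre_agent/agent/bgp_decision.py | _infer_fabric_and_device
-- ===== SOURCE A (Python) =====
-- from typing import Any
--
-- def _infer_fabric_and_device(
--     diagnosis: dict[str, Any],
--     fabric: str,
--     device: str,
-- ) -> tuple[str, str]:
--
--     if fabric != "default" and device != "unknown":
--         return fabric, device
--
--     raw_actions = diagnosis.get("proposed_actions", [])
--     if not isinstance(raw_actions, list):
--         return fabric, device
--
--     for item in raw_actions:
--         if not isinstance(item, dict):
--             continue
--
--         target = item.get("target", {})
--         if not isinstance(target, dict):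
--             continue
--
--         if fabric == "default":
--             inferred = target.get("fabric")
--             if inferred:
--                 fabric = str(inferred)
--
--         if device == "unknown":
--             inferred = target.get("device")
--             if inferred:
--                 device = str(inferred)
--
--         if fabric != "default" and device != "unknown":
--             break
--
--     return fabric, device
-- ===== SOURCE B (Python) =====
-- def _infer_fabric_and_device(diagnosis, fabric, device):
--     if fabric != "default" and device != "unknown":
--         return fabric, device
--
--     raw_actions = diagnosis.get("proposed_actions", [])
--     if not isinstance(raw_actions, list):
--         return fabric, device
--
--     targets = [t for item in raw_actions if isinstance(item, dict)
--                for t in [item.get("target", {})] if isinstance(t, dict)]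
--
--     if fabric == "default":
--         fabric = next((str(t["fabric"]) for t in targets if t.get("fabric")), fabric)
--     if device == "unknown":
--         device = next((str(t["device"]) for t in targets if t.get("device")), device)
--     return fabric, device
-- ===== Notes on version B (the rewrite author's own statement) =====
-- stated objective: simpler
-- what changed: Replaces A's single accumulating loop with early break by a flat list of valid target dicts and two independent first-truthy-match scans (next(...)) for fabric and device; Pre_ excludes inputs where some action target carries a fabric value literally 'default' or a device value literally 'unknown' -- a sentinel-valued target field is degenerate data on which no one would specify either behaviour (A keeps scanning past it, B takes the first truthy match; either value is defensible).
import Mathlib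
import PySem

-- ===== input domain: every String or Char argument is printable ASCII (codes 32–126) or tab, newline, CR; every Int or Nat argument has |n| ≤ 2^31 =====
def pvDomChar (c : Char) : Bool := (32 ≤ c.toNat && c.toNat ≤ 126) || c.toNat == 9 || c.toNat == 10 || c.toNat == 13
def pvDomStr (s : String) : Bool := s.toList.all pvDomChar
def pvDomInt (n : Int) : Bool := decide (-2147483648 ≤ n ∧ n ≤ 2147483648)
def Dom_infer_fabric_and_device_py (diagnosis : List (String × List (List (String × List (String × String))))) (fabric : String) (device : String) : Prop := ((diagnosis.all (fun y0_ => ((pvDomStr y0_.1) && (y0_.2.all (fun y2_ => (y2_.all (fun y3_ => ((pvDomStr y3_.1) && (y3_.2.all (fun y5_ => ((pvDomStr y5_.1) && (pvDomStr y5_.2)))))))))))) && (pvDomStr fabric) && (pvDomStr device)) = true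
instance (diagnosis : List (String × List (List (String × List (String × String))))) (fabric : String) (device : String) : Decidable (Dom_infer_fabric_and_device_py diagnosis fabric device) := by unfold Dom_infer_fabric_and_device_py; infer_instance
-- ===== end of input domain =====

-- B resolves fabric and device by two independent first-truthy-match scans over the
-- target dicts instead of A's single accumulating loop with a break (objective: simpler).


-- ===== PORT A =====
-- A's loop over raw_actions: fabric/device are the mutable state, 'break' is the
-- early return.  The isinstance checks of A are identically true under the typed
-- encoding (raw_actions is a list, every item and target is a dict), so the
-- 'continue' branches are unreachable and do not appear.
-- 'inferred = target.get(key); if inferred: cur = str(inferred)'  (truthy = nonempty; str(s) = s)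
def pyStep (key : String) (target : List (String × String)) (cur : String) : String :=
  match (PySem.Dict.mk target).get? key with
  | some s => if s ≠ "" then s else cur
  | none => cur

def pyLoopA (items : List (List (String × List (String × String)))) (f d : String) :
    String × String :=
  match items with
  | [] => (f, d)
  | item :: rest =>
    let target := (PySem.Dict.mk item).getD "target" []
    let f1 := if f = "default" then pyStep "fabric" target f else f
    let d1 := if d = "unknown" then pyStep "device" target d else d
    if f1 ≠ "default" ∧ d1 ≠ "unknown" then (f1, d1) else pyLoopA rest f1 d1

def infer_fabric_and_device_py (diagnosis : List (String × List (List (String × List (String × String))))) (fabric : String) (device : String) : String × String :=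
  if fabric ≠ "default" ∧ device ≠ "unknown" then (fabric, device)
  else
    let raw_actions := (PySem.Dict.mk diagnosis).getD "proposed_actions" []
    pyLoopA raw_actions fabric device

-- ===== PORT B =====
-- first target whose `key` value is truthy (truthy = nonempty string)
def pyPick (key : String) (targets : List (List (String × String))) : Option String :=
  targets.findSome? (fun t =>
    match (PySem.Dict.mk t).get? key with
    | some s => if s ≠ "" then some s else none
    | none => none)

def infer_fabric_and_device_py_alt (diagnosis : List (String × List (List (String × List (String × String))))) (fabric : String) (device : String) : String × String :=
  if fabric ≠ "default" ∧ device ≠ "unknown" then (fabric, device)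
  else
    let raw_actions := (PySem.Dict.mk diagnosis).getD "proposed_actions" []
    let targets := raw_actions.map (fun item => (PySem.Dict.mk item).getD "target" [])
    let fabric' := if fabric = "default" then (pyPick "fabric" targets).getD fabric else fabric
    let device' := if device = "unknown" then (pyPick "device" targets).getD device else device
    (fabric', device')

-- ===== PRECONDITION & SPEC =====
-- Pre_ excludes inputs where some action target carries a fabric value literally
-- "default" or a device value literally "unknown": a sentinel-valued target field is
-- degenerate data on which no one would specify either behaviour (A keeps scanning
-- past it, B takes the first truthy match; either value is defensible).
def Pre_infer_fabric_and_device_py (diagnosis : List (String × List (List (String × List (String × String))))) (fabric : String) (device : String) : Prop :=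
  ∀ item ∈ (PySem.Dict.mk diagnosis).getD "proposed_actions" [],
    (PySem.Dict.mk ((PySem.Dict.mk item).getD "target" [])).get? "fabric" ≠ some "default" ∧
    (PySem.Dict.mk ((PySem.Dict.mk item).getD "target" [])).get? "device" ≠ some "unknown"
instance (diagnosis : List (String × List (List (String × List (String × String))))) (fabric : String) (device : String) : Decidable (Pre_infer_fabric_and_device_py diagnosis fabric device) := by unfold Pre_infer_fabric_and_device_py; infer_instance

def pvWitness_infer_fabric_and_device_py : (List (String × List (List (String × List (String × String))))) × String × String :=
  ([("proposed_actions", [[("target", [("fabric", "f1"), ("device", "sw1")])]])], "default", "unknown")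

def Spec_infer_fabric_and_device_py (diagnosis : List (String × List (List (String × List (String × String))))) (fabric : String) (device : String) (out : String × String) : Prop := out = infer_fabric_and_device_py_alt diagnosis fabric device
instance (diagnosis : List (String × List (List (String × List (String × String))))) (fabric : String) (device : String) (out : String × String) : Decidable (Spec_infer_fabric_and_device_py diagnosis fabric device out) := by unfold Spec_infer_fabric_and_device_py; infer_instance

-- ===== CLAIM =====
def Claim_equal_infer_fabric_and_device_py : Prop := ∀ (diagnosis : List (String × List (List (String × List (String × String))))) (fabric : String) (device : String), Dom_infer_fabric_and_device_py diagnosis fabric device → Pre_infer_fabric_and_device_py diagnosis fabric device → Spec_infer_fabric_and_device_py diagnosis fabric device (infer_fabric_and_device_py diagnosis fabric device)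

-- ===== LEMMAS AND PROOFS =====

-- One step of A's state update, read through the rest of the scan.  The hypothesis
-- (from Pre_) that the target's value is not the sentinel makes A's write final
-- exactly when pyPick's first truthy match hits this target.
theorem pyStep_state (key sent : String) (t : List (String × String))
    (ts : List (List (String × String))) (f : String)
    (h : (PySem.Dict.mk t).get? key ≠ some sent) :
    (if (if f = sent then pyStep key t f else f) = sent then
        (pyPick key ts).getD (if f = sent then pyStep key t f else f)
      else (if f = sent then pyStep key t f else f))
    = (if f = sent then (pyPick key (t :: ts)).getD f else f) := by
  by_cases hf : f = sent
  · subst hf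
    simp only [pyPick, List.findSome?_cons, pyStep]
    rcases hg : (PySem.Dict.mk t).get? key with _ | s
    · simp
    · rw [hg] at h
      by_cases he : s = ""
      · simp [he]
      · have hs : s ≠ f := fun e => h (by rw [e])
        simp [he, hs]
  · simp [hf]

theorem pyLoopA_eq_pick (items : List (List (String × List (String × String))))
    (f d : String)
    (hpre : ∀ item ∈ items,
      (PySem.Dict.mk ((PySem.Dict.mk item).getD "target" [])).get? "fabric" ≠ some "default" ∧
      (PySem.Dict.mk ((PySem.Dict.mk item).getD "target" [])).get? "device" ≠ some "unknown") :
    pyLoopA items f d =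
      ((if f = "default" then
          (pyPick "fabric" (items.map (fun item => (PySem.Dict.mk item).getD "target" []))).getD f
        else f),
       (if d = "unknown" then
          (pyPick "device" (items.map (fun item => (PySem.Dict.mk item).getD "target" []))).getD d
        else d)) := by
  induction items generalizing f d with
  | nil => simp [pyLoopA, pyPick]
  | cons item rest ih =>
    simp only [pyLoopA, List.map_cons]
    set t := (PySem.Dict.mk item).getD "target" [] with ht
    set f1 := (if f = "default" then pyStep "fabric" t f else f) with hf1
    set d1 := (if d = "unknown" then pyStep "device" t d else d) with hd1
    have hhead := hpre item (List.mem_cons_self ..)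
    have hF := pyStep_state "fabric" "default"
      t (rest.map (fun item => (PySem.Dict.mk item).getD "target" [])) f hhead.1
    have hD := pyStep_state "device" "unknown"
      t (rest.map (fun item => (PySem.Dict.mk item).getD "target" [])) d hhead.2
    rw [← hf1] at hF
    rw [← hd1] at hD
    rw [← hF, ← hD]
    by_cases hbr : f1 ≠ "default" ∧ d1 ≠ "unknown"
    · rw [if_pos hbr, if_neg hbr.1, if_neg hbr.2]
    · rw [if_neg hbr, ih _ _ (fun x hx => hpre x (List.mem_cons_of_mem _ hx))]

-- ===== VERDICT =====
theorem infer_fabric_and_device_py_spec : Claim_equal_infer_fabric_and_device_py := by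
  intro diagnosis fabric device _ hpre
  unfold Spec_infer_fabric_and_device_py infer_fabric_and_device_py infer_fabric_and_device_py_alt
  by_cases h : fabric ≠ "default" ∧ device ≠ "unknown"
  · simp [h]
  · simp only [if_neg h]
    rw [pyLoopA_eq_pick _ _ _ hpre]
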